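-- pv_equiv track=rewrite | github.com/temmen-ai/KOOPTool | structure/post_numbering_cleanup.py | combine_predictions_chatgpt
-- ===== SOURCE A (Python) =====
-- def combine_predictions_chatgpt(prediction_batches):
--     # Totaal aantal zinnen afgeleid van het aantal voorspelling batches en hun lengte
--     total_sentences = len(prediction_batches) + len(prediction_batches[0]) - 1
--
--     # Maak een lege dictionary om de voorspellingen per zin op te slaan
--     sentence_predictions = {i: [] for i in range(1, total_sentences + 1)}
--
--     # Loop door elke batch van voorspellingen
--     for i, batch in enumerate(prediction_batches):
--         # Voor elk element in de batch, voeg de voorspelling toe aan de juiste zin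
--         for j, prediction in enumerate(batch):
--             sentence_index = i + j + 1
--             if sentence_index <= total_sentences:
--                 sentence_predictions[sentence_index].append(prediction)
--
--     return sentence_predictions
-- ===== SOURCE B (Python) =====
-- def combine_predictions_chatgpt(prediction_batches):
--     # Gather per sentence along anti-diagonals instead of scatter-push per batch.
--     total_sentences = len(prediction_batches) + len(prediction_batches[0]) - 1
--     result = {}
--     for s in range(1, total_sentences + 1):
--         result[s] = [batch[s - 1 - i] for i, batch in enumerate(prediction_batches)
--                      if 0 <= s - 1 - i < len(batch)]
--     return result
-- ===== Notes on version B (the rewrite author's own statement) =====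
-- stated objective: alternative
-- what changed: A scatters each windowed prediction into a pre-initialised dict keyed by sentence index; B instead iterates over sentence indices 1..total_sentences and gathers batch[s-1-i] along the anti-diagonal, building each slot's list directly.
import Mathlib
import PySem

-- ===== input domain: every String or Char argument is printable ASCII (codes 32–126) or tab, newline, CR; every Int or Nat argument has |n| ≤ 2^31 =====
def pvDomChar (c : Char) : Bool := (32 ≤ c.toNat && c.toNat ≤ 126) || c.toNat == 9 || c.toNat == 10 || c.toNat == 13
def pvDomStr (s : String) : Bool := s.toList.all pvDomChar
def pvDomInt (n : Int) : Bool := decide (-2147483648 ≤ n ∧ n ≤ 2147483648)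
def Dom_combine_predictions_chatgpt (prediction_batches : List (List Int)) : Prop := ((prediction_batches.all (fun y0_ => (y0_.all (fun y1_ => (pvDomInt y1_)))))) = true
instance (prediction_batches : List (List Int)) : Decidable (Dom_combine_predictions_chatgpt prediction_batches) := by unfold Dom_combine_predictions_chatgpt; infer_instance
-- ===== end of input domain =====

-- B replaces A's scatter (push each window prediction into a dict slot) by a per-sentence
-- gather along anti-diagonals; objective: alternative decomposition, same cost.

-- ===== PORT A =====
-- Transliteration of A. `prediction_batches[0]` raises IndexError on an empty list
-- (excluded by Pre_); `headD []` stands for that access there.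
-- `sentence_predictions[sentence_index].append(...)` is `modify` with default []: exact here
-- because under the guard the key is always present (proved below), so no KeyError occurs.
def combine_predictions_chatgpt (prediction_batches : List (List Int)) : List (Int × List Int) :=
  let total_sentences : Int :=
    (prediction_batches.length : Int) + ((prediction_batches.headD []).length : Int) - 1
  let sentence_predictions : PySem.Dict Int (List Int) :=
    (PySem.List.pyRange 1 (total_sentences + 1) 1).foldl
      (fun d i => d.insert i []) PySem.Dict.empty
  let final : PySem.Dict Int (List Int) :=
    (PySem.List.enumerate prediction_batches).foldl
      (fun d ib =>
        (PySem.List.enumerate ib.2).foldl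
          (fun d jp =>
            if ib.1 + jp.1 + 1 ≤ total_sentences then
              d.modify (ib.1 + jp.1 + 1) [] (fun v => v ++ [jp.2])
            else d)
          d)
      sentence_predictions
  final.items

-- ===== PORT B =====
-- Transliteration of Source B: for each sentence s gather batch[s-1-i] over the batches.
def combine_predictions_chatgpt_alt (prediction_batches : List (List Int)) : List (Int × List Int) :=
  let total_sentences : Int :=
    (prediction_batches.length : Int) + ((prediction_batches.headD []).length : Int) - 1
  (PySem.List.pyRange 1 (total_sentences + 1) 1).map
    (fun s =>
      (s, (PySem.List.enumerate prediction_batches).foldl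
            (fun acc ib =>
              if 0 ≤ s - 1 - ib.1 ∧ s - 1 - ib.1 < (ib.2.length : Int) then
                acc ++ [PySem.List.pyGetD ib.2 (s - 1 - ib.1) 0]
              else acc)
            []))

-- ===== PRECONDITION & SPEC =====
-- Pre_ excludes only the empty list, on which A raises IndexError (prediction_batches[0]).
def Pre_combine_predictions_chatgpt (prediction_batches : List (List Int)) : Prop :=
  prediction_batches ≠ []
instance (prediction_batches : List (List Int)) : Decidable (Pre_combine_predictions_chatgpt prediction_batches) := by unfold Pre_combine_predictions_chatgpt; infer_instance
def pvWitness_combine_predictions_chatgpt : List (List Int) := [[1, 2], [3]]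
def Spec_combine_predictions_chatgpt (prediction_batches : List (List Int)) (out : List (Int × List Int)) : Prop := out = combine_predictions_chatgpt_alt prediction_batches
instance (prediction_batches : List (List Int)) (out : List (Int × List Int)) : Decidable (Spec_combine_predictions_chatgpt prediction_batches out) := by unfold Spec_combine_predictions_chatgpt; infer_instance

-- ===== CLAIM (what is proved, stated in full; the proofs are below) =====
def Claim_equal_combine_predictions_chatgpt : Prop := ∀ (prediction_batches : List (List Int)), Dom_combine_predictions_chatgpt prediction_batches → Pre_combine_predictions_chatgpt prediction_batches → Spec_combine_predictions_chatgpt prediction_batches (combine_predictions_chatgpt prediction_batches)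

-- ===== LEMMAS AND PROOFS =====

-- the per-batch contribution B collects for sentence s from enumerated batch ib
def pvContrib (s : Int) (ib : Int × List Int) : List Int :=
  if 0 ≤ s - 1 - ib.1 ∧ s - 1 - ib.1 < (ib.2.length : Int) then
    [PySem.List.pyGetD ib.2 (s - 1 - ib.1) 0]
  else []

-- B's inner fold, flattened per batch
lemma pvFoldl_contrib (s : Int) (l : List (Int × List Int)) :
    ∀ (acc : List Int),
    l.foldl
      (fun acc ib =>
        if 0 ≤ s - 1 - ib.1 ∧ s - 1 - ib.1 < (ib.2.length : Int) then
          acc ++ [PySem.List.pyGetD ib.2 (s - 1 - ib.1) 0]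
        else acc)
      acc
    = acc ++ (l.map (pvContrib s)).flatten := by
  induction l with
  | nil => simp
  | cons ib rest ih =>
    intro acc
    simp only [List.foldl_cons, List.map_cons, List.flatten_cons, ih, pvContrib]
    split_ifs <;> simp

-- A's inner (per-batch) loop, read through getD at sentence s
lemma pvInnerA_getD (T i : Int) (batch : List Int) :
    ∀ (j0 : Int) (d : PySem.Dict Int (List Int)) (s : Int),
    ((PySem.List.enumerate batch j0).foldl
        (fun d jp =>
          if i + jp.1 + 1 ≤ T then d.modify (i + jp.1 + 1) [] (fun v => v ++ [jp.2]) else d)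
        d).getD s []
    = d.getD s [] ++
        (if i + j0 + 1 ≤ s ∧ s ≤ T ∧ s - 1 - i - j0 < (batch.length : Int)
          then [batch.getD (s - 1 - i - j0).toNat 0] else []) := by
  induction batch with
  | nil =>
    intro j0 d s
    simp only [PySem.List.enumerate_nil, List.foldl_nil, List.length_nil]
    rw [if_neg (by push_cast; omega)]
    simp
  | cons x xs ih =>
    intro j0 d s
    rw [PySem.List.enumerate_cons, List.foldl_cons, ih (j0 + 1)]
    have hlen : ((x :: xs).length : Int) = (xs.length : Int) + 1 := by
      push_cast [List.length_cons]; ring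
    rw [hlen]
    by_cases hg : i + j0 + 1 ≤ T
    · rw [if_pos hg, PySem.Dict.getD_modify]
      by_cases hs : s = i + j0 + 1
      · rw [if_pos hs,
            if_neg (show ¬(i + (j0 + 1) + 1 ≤ s ∧ s ≤ T ∧ s - 1 - i - (j0 + 1) < (xs.length : Int)) by omega),
            if_pos (show i + j0 + 1 ≤ s ∧ s ≤ T ∧ s - 1 - i - j0 < (xs.length : Int) + 1 by omega)]
        have h3 : (s - 1 - i - j0).toNat = 0 := by omega
        rw [h3, List.getD_cons_zero]
        simp [hs]
      · rw [if_neg hs]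
        by_cases h2 : i + (j0 + 1) + 1 ≤ s ∧ s ≤ T ∧ s - 1 - i - (j0 + 1) < (xs.length : Int)
        · rw [if_pos h2, if_pos (show i + j0 + 1 ≤ s ∧ s ≤ T ∧ s - 1 - i - j0 < (xs.length : Int) + 1 by omega)]
          have h4 : (s - 1 - i - j0).toNat = (s - 1 - i - (j0 + 1)).toNat + 1 := by omega
          rw [h4, List.getD_cons_succ]
        · rw [if_neg h2, if_neg (by omega)]
    · rw [if_neg hg,
          if_neg (show ¬(i + (j0 + 1) + 1 ≤ s ∧ s ≤ T ∧ s - 1 - i - (j0 + 1) < (xs.length : Int)) by omega),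
          if_neg (show ¬(i + j0 + 1 ≤ s ∧ s ≤ T ∧ s - 1 - i - j0 < (xs.length : Int) + 1) by omega)]

-- A's outer loop, read through getD at sentence s (s ≤ T): it appends exactly B's contributions
lemma pvOuterA_getD (T : Int) (l : List (List Int)) :
    ∀ (i0 : Int) (d : PySem.Dict Int (List Int)) (s : Int), s ≤ T →
    ((PySem.List.enumerate l i0).foldl
        (fun d ib =>
          (PySem.List.enumerate ib.2).foldl
            (fun d jp =>
              if ib.1 + jp.1 + 1 ≤ T then d.modify (ib.1 + jp.1 + 1) [] (fun v => v ++ [jp.2]) else d)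
            d)
        d).getD s []
    = d.getD s [] ++ ((PySem.List.enumerate l i0).map (pvContrib s)).flatten := by
  induction l with
  | nil => intro i0 d s _; simp
  | cons b bs ih =>
    intro i0 d s hsT
    rw [PySem.List.enumerate_cons, List.foldl_cons, ih (i0 + 1) _ s hsT,
        pvInnerA_getD T i0 b 0 _ s]
    have hc : (if i0 + 0 + 1 ≤ s ∧ s ≤ T ∧ s - 1 - i0 - 0 < (b.length : Int)
              then [b.getD (s - 1 - i0 - 0).toNat 0] else []) = pvContrib s (i0, b) := by
      simp only [pvContrib]
      by_cases h : 0 ≤ s - 1 - i0 ∧ s - 1 - i0 < (b.length : Int)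
      · rw [if_pos (by omega), if_pos h,
            PySem.List.pyGetD_eq_getElem _ _ h.1 h.2,
            List.getD_eq_getElem _ _ (by omega)]
        norm_num
      · rw [if_neg (by omega), if_neg h]
    rw [hc]
    simp [List.append_assoc]

-- A's inner loop preserves the key list range(1, T+1): every modified key is already present
lemma pvInnerA_keys (T i : Int) (hi : 0 ≤ i) (batch : List Int) :
    ∀ (j0 : Int), 0 ≤ j0 → ∀ (d : PySem.Dict Int (List Int)),
    d.keys = PySem.List.pyRange 1 (T + 1) 1 →
    ((PySem.List.enumerate batch j0).foldl
        (fun d jp =>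
          if i + jp.1 + 1 ≤ T then d.modify (i + jp.1 + 1) [] (fun v => v ++ [jp.2]) else d)
        d).keys = PySem.List.pyRange 1 (T + 1) 1 := by
  induction batch with
  | nil => intro j0 _ d hd; simpa using hd
  | cons x xs ih =>
    intro j0 hj0 d hd
    rw [PySem.List.enumerate_cons, List.foldl_cons]
    apply ih (j0 + 1) (by omega)
    by_cases hg : i + j0 + 1 ≤ T
    · rw [if_pos hg, PySem.Dict.keys_modify,
          PySem.Dict.keys_insert_of_contains, hd]
      rw [PySem.Dict.contains_eq_decide_mem_keys, hd]
      simp only [PySem.List.mem_pyRange_one, decide_eq_true_eq]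
      omega
    · rw [if_neg hg]; exact hd

lemma pvOuterA_keys (T : Int) (l : List (List Int)) :
    ∀ (i0 : Int), 0 ≤ i0 → ∀ (d : PySem.Dict Int (List Int)),
    d.keys = PySem.List.pyRange 1 (T + 1) 1 →
    ((PySem.List.enumerate l i0).foldl
        (fun d ib =>
          (PySem.List.enumerate ib.2).foldl
            (fun d jp =>
              if ib.1 + jp.1 + 1 ≤ T then d.modify (ib.1 + jp.1 + 1) [] (fun v => v ++ [jp.2]) else d)
            d)
        d).keys = PySem.List.pyRange 1 (T + 1) 1 := by
  induction l with
  | nil => intro i0 _ d hd; simpa using hd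
  | cons b bs ih =>
    intro i0 hi0 d hd
    rw [PySem.List.enumerate_cons, List.foldl_cons]
    exact ih (i0 + 1) (by omega) _ (pvInnerA_keys T i0 hi0 b 0 le_rfl d hd)

-- the two ports agree on every input
lemma pvMain (pb : List (List Int)) :
    combine_predictions_chatgpt pb = combine_predictions_chatgpt_alt pb := by
  unfold combine_predictions_chatgpt combine_predictions_chatgpt_alt
  set T : Int := (pb.length : Int) + ((pb.headD []).length : Int) - 1 with hT
  set R : List Int := PySem.List.pyRange 1 (T + 1) 1 with hR
  set init : PySem.Dict Int (List Int) := R.foldl (fun d i => d.insert i []) PySem.Dict.empty with hinitdef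
  have hRnodup : R.Nodup := PySem.List.nodup_pyRange_one 1 (T + 1)
  have hinit : init.items = R.map (fun i => (i, ([] : List Int))) := by
    have h := PySem.Dict.items_foldl_insert_fresh R (fun i => i) (fun _ => ([] : List Int))
      PySem.Dict.empty (fun a _ => PySem.Dict.contains_empty a) (by simpa using hRnodup)
    simpa using h
  have hkeys0 : init.keys = R := by
    simp only [PySem.Dict.keys, hinit, List.map_map]
    simp [Function.comp_def]
  have hfk : ((PySem.List.enumerate pb).foldl
      (fun d ib =>
        (PySem.List.enumerate ib.2).foldl
          (fun d jp =>
            if ib.1 + jp.1 + 1 ≤ T then d.modify (ib.1 + jp.1 + 1) [] (fun v => v ++ [jp.2]) else d)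
          d)
      init).keys = R := pvOuterA_keys T pb 0 le_rfl init hkeys0
  have hitems := PySem.Dict.items_eq_map_keys
    ((PySem.List.enumerate pb).foldl
      (fun d ib =>
        (PySem.List.enumerate ib.2).foldl
          (fun d jp =>
            if ib.1 + jp.1 + 1 ≤ T then d.modify (ib.1 + jp.1 + 1) [] (fun v => v ++ [jp.2]) else d)
          d)
      init) (by rw [hfk]; exact hRnodup) ([] : List Int)
  rw [hitems, hfk]
  apply List.map_congr_left
  intro s hs
  have hsR : 1 ≤ s ∧ s < T + 1 := PySem.List.mem_pyRange_one.mp hs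
  have hgetD0 : init.getD s [] = [] := by
    apply PySem.Dict.getD_of_mem_items
    · rw [hinit]; exact List.mem_map.mpr ⟨s, hs, rfl⟩
    · rw [hkeys0]; exact hRnodup
  rw [pvOuterA_getD T pb 0 init s (by omega), hgetD0, pvFoldl_contrib s]

-- ===== VERDICT (by name: the statement is the Claim_ definition above) =====
theorem combine_predictions_chatgpt_spec : Claim_equal_combine_predictions_chatgpt := by
  intro pb _ _
  unfold Spec_combine_predictions_chatgpt
  exact pvMain pb
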